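-- pv_equiv track=rewrite | github.com/lucavh/advent-of-code | 2015/day03.py | walk_route
-- ===== SOURCE A (Python) =====
-- def walk_route(route, visited):
--     visiting_house = (1,1)
--     visited.add(visiting_house)
--     for i in range(len(route)):
--         if route[i] == "^":
--             visiting_house = (visiting_house[0]-1, visiting_house[1])
--         elif route[i] == "v":
--             visiting_house = (visiting_house[0]+1, visiting_house[1])
--         elif route[i] == "<":
--             visiting_house = (visiting_house[0], visiting_house[1]-1)
--         elif route[i] == ">":
--             visiting_house = (visiting_house[0], visiting_house[1]+1)
--         visited.add(visiting_house)
--     return visited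
-- ===== SOURCE B (Python) =====
-- DELTAS = {"^": (-1, 0), "v": (1, 0), "<": (0, -1), ">": (0, 1)}
--
--
-- def _scan(cs):
--     """Divide and conquer: positions relative to the start, one per move.
--
--     Split the route in half, scan both halves independently, then shift the
--     right half's positions by the endpoint of the left half."""
--     if not cs:
--         return []
--     if len(cs) == 1:
--         return [DELTAS.get(cs[0], (0, 0))]
--     mid = len(cs) // 2
--     left = _scan(cs[:mid])
--     right = _scan(cs[mid:])
--     ex, ey = left[-1]
--     return left + [(ex + x, ey + y) for (x, y) in right]
--
--
-- def walk_route(route, visited):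
--     visited.add((1, 1))
--     visited.update((1 + x, 1 + y) for (x, y) in _scan(route))
--     return visited
-- ===== Notes on version B (the rewrite author's own statement) =====
-- stated objective: alternative
-- what changed: Replaces A's single-pass branch-per-step accumulator loop with per-step set.add by a divide-and-conquer prefix scan: the route is split in half recursively, each half's relative positions are computed independently and the right half's positions are shifted by the left half's endpoint; the resulting position list is bulk-inserted with one set.update.
import Mathlib
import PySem

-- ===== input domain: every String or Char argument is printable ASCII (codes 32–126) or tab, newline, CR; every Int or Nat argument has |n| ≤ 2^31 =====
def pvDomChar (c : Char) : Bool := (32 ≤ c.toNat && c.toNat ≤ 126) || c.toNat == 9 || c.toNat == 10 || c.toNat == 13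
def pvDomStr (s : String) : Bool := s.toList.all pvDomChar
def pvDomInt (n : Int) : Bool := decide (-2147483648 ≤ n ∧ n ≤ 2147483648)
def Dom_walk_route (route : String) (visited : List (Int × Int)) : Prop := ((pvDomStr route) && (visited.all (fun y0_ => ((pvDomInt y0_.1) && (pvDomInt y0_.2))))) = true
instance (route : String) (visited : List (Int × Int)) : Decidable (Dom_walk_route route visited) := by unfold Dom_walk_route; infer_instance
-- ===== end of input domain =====

-- B replaces A's branch-per-step accumulator loop (per-step set.add) by a
-- divide-and-conquer prefix scan (scan each half, shift the right half by the
-- left half's endpoint) followed by one bulk set.update; same results, a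
-- different algorithm.  Both Pythons mutate 'visited' in place identically;
-- the theorem is about the returned set (its element list in insertion order).

-- ===== PORT A =====
def walk_route (route : String) (visited : List (Int × Int)) : List (Int × Int) :=
  let r := (PySem.List.pyRange 0 (PySem.Str.len route) 1).foldl
    (fun (st : (Int × Int) × List (Int × Int)) i =>
      let c := PySem.Str.pyGet? route i
      let h := st.1
      let h :=
        if c = some '^' then (h.1 - 1, h.2)
        else if c = some 'v' then (h.1 + 1, h.2)
        else if c = some '<' then (h.1, h.2 - 1)
        else if c = some '>' then (h.1, h.2 + 1)
        else h
      (h, PySem.Set.add st.2 h))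
    ((1, 1), PySem.Set.add visited (1, 1))
  r.2

-- ===== PORT B =====
def pvDeltas : PySem.Dict Char (Int × Int) :=
  PySem.Dict.ofList [('^', (-1, 0)), ('v', (1, 0)), ('<', (0, -1)), ('>', (0, 1))]

-- B's _scan: divide-and-conquer positions relative to the start, one per move.
def pvScan : List Char → List (Int × Int)
  | [] => []
  | [c] => [PySem.Dict.getD pvDeltas c (0, 0)]
  | a :: b :: t =>
    let cs := a :: b :: t
    let mid := cs.length / 2
    let left := pvScan (cs.take mid)
    let right := pvScan (cs.drop mid)
    let e := left.getLast?.getD (0, 0)   -- left[-1]; left is nonempty here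
    left ++ right.map (fun p => (e.1 + p.1, e.2 + p.2))
  termination_by cs => cs.length
  decreasing_by
  · simp [List.length_take]; omega
  · simp [List.length_drop]; omega

def walk_route_alt (route : String) (visited : List (Int × Int)) : List (Int × Int) :=
  PySem.Set.update (PySem.Set.add visited (1, 1))
    ((pvScan route.toList).map (fun p => (1 + p.1, 1 + p.2)))

-- ===== PRECONDITION & SPEC =====
def Spec_walk_route (route : String) (visited : List (Int × Int)) (out : List (Int × Int)) : Prop := out = walk_route_alt route visited
instance (route : String) (visited : List (Int × Int)) (out : List (Int × Int)) : Decidable (Spec_walk_route route visited out) := by unfold Spec_walk_route; infer_instance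

-- ===== CLAIM =====
def Claim_equal_walk_route : Prop := ∀ (route : String) (visited : List (Int × Int)), Dom_walk_route route visited → Spec_walk_route route visited (walk_route route visited)

-- ===== LEMMAS AND PROOFS =====

-- A simple recursive characterisation of the list of relative positions.
def psL : List Char → List (Int × Int)
  | [] => []
  | c :: cs =>
    let d := PySem.Dict.getD pvDeltas c (0, 0)
    d :: (psL cs).map (fun p => (d.1 + p.1, d.2 + p.2))

lemma psL_ne_nil (c : Char) (cs : List Char) : psL (c :: cs) ≠ [] := by
  simp [psL]

lemma psL_append (l r : List Char) (hl : l ≠ []) :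
    psL (l ++ r) = psL l ++ (psL r).map
      (fun p => (((psL l).getLast?.getD (0, 0)).1 + p.1,
                 ((psL l).getLast?.getD (0, 0)).2 + p.2)) := by
  induction l with
  | nil => simp at hl
  | cons c l ih =>
      by_cases hl' : l = []
      · subst hl'
        simp [psL]
      · obtain ⟨p, ps, hps⟩ : ∃ p ps, psL l = p :: ps := by
          cases h : psL l with
          | nil =>
              cases l with
              | nil => exact absurd rfl hl'
              | cons a as => exact absurd h (psL_ne_nil a as)
          | cons p ps => exact ⟨p, ps, rfl⟩
        simp only [List.cons_append, psL, ih hl', List.map_append, List.map_map]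
        have hE : ((pvDeltas.getD c (0, 0) ::
              (psL l).map (fun p => ((pvDeltas.getD c (0, 0)).1 + p.1,
                                     (pvDeltas.getD c (0, 0)).2 + p.2))).getLast?.getD (0, 0))
            = ((pvDeltas.getD c (0, 0)).1 + ((psL l).getLast?.getD (0, 0)).1,
               (pvDeltas.getD c (0, 0)).2 + ((psL l).getLast?.getD (0, 0)).2) := by
          rw [hps]
          simp only [List.map_cons, List.getLast?_cons, List.getLast?_map]
          cases ps.getLast? with
          | none => simp
          | some q => simp
        rw [hE]
        congr 1
        congr 1
        apply List.map_congr_left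
        intro x _
        simp [Prod.ext_iff]; omega

lemma pvScan_eq_psL (cs : List Char) : pvScan cs = psL cs := by
  generalize hn : cs.length = n
  induction n using Nat.strong_induction_on generalizing cs with
  | _ n ih =>
    match cs, hn with
    | [], _ => simp [pvScan, psL]
    | [c], _ => simp [pvScan, psL]
    | a :: b :: t, hn =>
        rw [pvScan]
        have hlen : t.length + 2 = n := by simpa using hn
        have htake : ((a :: b :: t).take ((a :: b :: t).length / 2)).length < n := by
          simp only [List.length_take, List.length_cons]; omega
        have hdrop : ((a :: b :: t).drop ((a :: b :: t).length / 2)).length < n := by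
          simp only [List.length_drop, List.length_cons]; omega
        rw [ih _ htake _ rfl, ih _ hdrop _ rfl]
        have hne : (a :: b :: t).take ((a :: b :: t).length / 2) ≠ [] := by
          intro h
          have := congrArg List.length h
          simp [List.length_take] at this
        have := psL_append ((a :: b :: t).take ((a :: b :: t).length / 2))
          ((a :: b :: t).drop ((a :: b :: t).length / 2)) hne
        rw [List.take_append_drop] at this
        rw [this]

-- A's per-char move equals "add the delta from the table".
lemma getD_other (c : Char) (h1 : c ≠ '^') (h2 : c ≠ 'v') (h3 : c ≠ '<') (h4 : c ≠ '>') :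
    PySem.Dict.getD pvDeltas c (0, 0) = (0, 0) := by
  have b1 : (('^' : Char) == c) = false := by simp [Ne.symm h1]
  have b2 : (('v' : Char) == c) = false := by simp [Ne.symm h2]
  have b3 : (('<' : Char) == c) = false := by simp [Ne.symm h3]
  have b4 : (('>' : Char) == c) = false := by simp [Ne.symm h4]
  simp [pvDeltas, PySem.Dict.getD, PySem.Dict.get?, PySem.Dict.ofList, PySem.Dict.update,
    PySem.Dict.insert, PySem.Dict.empty, PySem.Dict.contains, List.foldl, List.find?,
    b1, b2, b3, b4]

lemma move_eq_delta (c : Char) (h : Int × Int) :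
    (if some c = some '^' then (h.1 - 1, h.2)
     else if some c = some 'v' then (h.1 + 1, h.2)
     else if some c = some '<' then (h.1, h.2 - 1)
     else if some c = some '>' then (h.1, h.2 + 1)
     else h)
    = (h.1 + (PySem.Dict.getD pvDeltas c (0, 0)).1,
       h.2 + (PySem.Dict.getD pvDeltas c (0, 0)).2) := by
  by_cases h1 : c = '^'
  · subst h1; have : PySem.Dict.getD pvDeltas '^' (0, 0) = (-1, 0) := by decide
    simp [this, Prod.ext_iff]; omega
  by_cases h2 : c = 'v'
  · subst h2; have : PySem.Dict.getD pvDeltas 'v' (0, 0) = (1, 0) := by decide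
    simp [this]
  by_cases h3 : c = '<'
  · subst h3; have : PySem.Dict.getD pvDeltas '<' (0, 0) = (0, -1) := by decide
    simp [this, Prod.ext_iff]; omega
  by_cases h4 : c = '>'
  · subst h4; have : PySem.Dict.getD pvDeltas '>' (0, 0) = (0, 1) := by decide
    simp [this]
  simp [h1, h2, h3, h4, getD_other c h1 h2 h3 h4]

-- A's fold over the chars = bulk-adding h-shifted psL positions.
lemma fold_eq_psL (cs : List Char) (h : Int × Int) (s : List (Int × Int)) :
    (cs.foldl
      (fun (st : (Int × Int) × List (Int × Int)) c =>
        let h := st.1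
        let h :=
          if some c = some '^' then (h.1 - 1, h.2)
          else if some c = some 'v' then (h.1 + 1, h.2)
          else if some c = some '<' then (h.1, h.2 - 1)
          else if some c = some '>' then (h.1, h.2 + 1)
          else h
        (h, PySem.Set.add st.2 h)) (h, s)).2
    = ((psL cs).map (fun p => (h.1 + p.1, h.2 + p.2))).foldl PySem.Set.add s := by
  induction cs generalizing h s with
  | nil => simp [psL]
  | cons c cs ih =>
      simp only [List.foldl_cons, psL, List.map_cons, List.map_map]
      rw [move_eq_delta]
      rw [ih]
      congr 1
      apply List.map_congr_left
      intro p _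
      simp [Prod.ext_iff]; omega

theorem walk_route_spec_aux (route : String) (visited : List (Int × Int)) :
    walk_route route visited = walk_route_alt route visited := by
  unfold walk_route walk_route_alt
  -- turn A's index loop over range(len(route)) into a fold over the characters
  have hidx : (PySem.List.pyRange 0 (PySem.Str.len route) 1).foldl
      (fun (st : (Int × Int) × List (Int × Int)) i =>
        let c := PySem.Str.pyGet? route i
        let h := st.1
        let h :=
          if c = some '^' then (h.1 - 1, h.2)
          else if c = some 'v' then (h.1 + 1, h.2)
          else if c = some '<' then (h.1, h.2 - 1)
          else if c = some '>' then (h.1, h.2 + 1)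
          else h
        (h, PySem.Set.add st.2 h))
      ((1, 1), PySem.Set.add visited (1, 1))
      = route.toList.foldl
      (fun (st : (Int × Int) × List (Int × Int)) c =>
        let h := st.1
        let h :=
          if some c = some '^' then (h.1 - 1, h.2)
          else if some c = some 'v' then (h.1 + 1, h.2)
          else if some c = some '<' then (h.1, h.2 - 1)
          else if some c = some '>' then (h.1, h.2 + 1)
          else h
        (h, PySem.Set.add st.2 h))
      ((1, 1), PySem.Set.add visited (1, 1)) := by
    rw [PySem.List.foldl_congr_mem
      (g := fun (st : (Int × Int) × List (Int × Int)) i =>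
        let c := some (PySem.List.pyGetD route.toList i ' ')
        let h := st.1
        let h :=
          if c = some '^' then (h.1 - 1, h.2)
          else if c = some 'v' then (h.1 + 1, h.2)
          else if c = some '<' then (h.1, h.2 - 1)
          else if c = some '>' then (h.1, h.2 + 1)
          else h
        (h, PySem.Set.add st.2 h))]
    · have := PySem.List.foldl_pyRange_zero_pyGetD route.toList ' '
        (fun (st : (Int × Int) × List (Int × Int)) c =>
          let h := st.1
          let h :=
            if some c = some '^' then (h.1 - 1, h.2)
            else if some c = some 'v' then (h.1 + 1, h.2)
            else if some c = some '<' then (h.1, h.2 - 1)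
            else if some c = some '>' then (h.1, h.2 + 1)
            else h
          (h, PySem.Set.add st.2 h))
        ((1, 1), PySem.Set.add visited (1, 1))
      simpa using this
    · intro acc i hi
      rw [PySem.List.mem_pyRange_one] at hi
      have h0 : 0 ≤ i := by simpa using hi.1
      have h1 : i < route.toList.length := by
        have := hi.2; simpa [PySem.Str.len_eq] using this
      have hg : PySem.List.pyGet? route.toList i = some (PySem.List.pyGetD route.toList i ' ') := by
        rw [PySem.List.pyGet?_eq_some_getElem route.toList h0 h1,
          PySem.List.pyGetD_eq_getElem route.toList ' ' h0 h1]
      simp [hg]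
  rw [hidx, fold_eq_psL, pvScan_eq_psL]
  simp [PySem.Set.update]

-- ===== VERDICT =====
theorem walk_route_spec : Claim_equal_walk_route := by
  intro route visited _
  unfold Spec_walk_route
  exact walk_route_spec_aux route visited
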